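-- pv_equiv track=rewrite | github.com/Cashfire/leetcodePython | climbing-stairs.py | clim_stair_sw
-- ===== SOURCE A (Python) =====
-- def clim_stair_sw(h, k):
--     # O(n) time and O(n) space
--     # sliding window of k, records[i] = records[i-1]*2 - records[i-1-k]
--     records = [1] * (h + 1)
--     for i in range(2, h + 1):
--         if i <= k:
--             records[i] = records[i-1] * 2
--         else:
--             records[i] = records[i - 1] * 2 - records[i - 1 - k]
--     return records[h]
-- ===== SOURCE B (Python) =====
-- def clim_stair_sw(h, k):
--     # prefix-sum DP: pre[i] = w[0] + ... + w[i], where w[j] = ways to reach step j;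
--     # w[i] is recovered as a difference of two prefix sums.
--     pre = [1]
--     for i in range(1, h + 1):
--         w = pre[-1] - (pre[i - k - 1] if i - k - 1 >= 0 else 0)
--         pre.append(pre[-1] + w)
--     return pre[h] - (pre[h - 1] if h >= 1 else 0)
-- ===== Notes on version B (the rewrite author's own statement) =====
-- stated objective: alternative
-- what changed: B maintains the list of prefix sums of the ways-DP (each new prefix sum obtained from the previous one and one lookup k+1 back, the final answer recovered as a difference of the last two prefix sums), instead of A's branch on i<=k with the telescoped sliding-window update records[i]=2*records[i-1]-records[i-1-k] on the counts themselves.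
-- outside the precondition, e.g. on clim_stair_sw(3, 0): A returns 1, B returns 0; on clim_stair_sw(2, -1): A returns 1, B raises IndexError
import Mathlib
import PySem

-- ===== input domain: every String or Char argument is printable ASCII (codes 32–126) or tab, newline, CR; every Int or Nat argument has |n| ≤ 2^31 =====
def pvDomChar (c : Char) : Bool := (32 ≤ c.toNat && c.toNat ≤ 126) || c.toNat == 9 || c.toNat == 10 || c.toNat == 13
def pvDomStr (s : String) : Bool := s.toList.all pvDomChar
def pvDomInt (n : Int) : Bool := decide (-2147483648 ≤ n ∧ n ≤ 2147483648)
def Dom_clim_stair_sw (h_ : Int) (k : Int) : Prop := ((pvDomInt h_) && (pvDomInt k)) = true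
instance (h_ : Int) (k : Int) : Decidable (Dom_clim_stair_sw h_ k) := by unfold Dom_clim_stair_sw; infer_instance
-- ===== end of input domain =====

-- B maintains the prefix sums of the ways-DP and recovers each value as a difference of prefix sums, instead of A's branch on i<=k with the telescoped sliding-window update on the counts themselves.


-- ===== PORT A =====
-- pyGetD with default 0 is exact wherever the index is in range, which holds on all of Pre_.
def clim_stair_sw (h_ : Int) (k : Int) : Int :=
  let records := List.replicate (h_ + 1).toNat (1 : Int)
  let records := (PySem.List.pyRange 2 (h_ + 1) 1).foldl (fun recs i =>
    if i ≤ k then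
      PySem.List.pySetD recs i (PySem.List.pyGetD recs (i - 1) 0 * 2)
    else
      PySem.List.pySetD recs i
        (PySem.List.pyGetD recs (i - 1) 0 * 2 - PySem.List.pyGetD recs (i - 1 - k) 0)) records
  PySem.List.pyGetD records h_ 0

-- ===== PORT B =====
def clim_stair_sw_alt (h_ : Int) (k : Int) : Int :=
  let pre := (PySem.List.pyRange 1 (h_ + 1) 1).foldl (fun ps i =>
    let w := PySem.List.pyGetD ps (-1) 0 -
      (if i - k - 1 ≥ 0 then PySem.List.pyGetD ps (i - k - 1) 0 else 0)
    ps ++ [PySem.List.pyGetD ps (-1) 0 + w]) [(1 : Int)]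
  PySem.List.pyGetD pre h_ 0 - (if h_ ≥ 1 then PySem.List.pyGetD pre (h_ - 1) 0 else 0)

-- ===== PRECONDITION & SPEC =====
-- Pre_ excludes h_ < 0, where A raises IndexError, and k ≤ 0, outside the natural domain
-- (step sizes 1..k), where A's all-ones answers are artefacts of the untouched pre-filled array.
def Pre_clim_stair_sw (h_ : Int) (k : Int) : Prop := 0 ≤ h_ ∧ 1 ≤ k
instance (h_ : Int) (k : Int) : Decidable (Pre_clim_stair_sw h_ k) := by unfold Pre_clim_stair_sw; infer_instance
def pvWitness_clim_stair_sw : Int × Int := (5, 2)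

def Spec_clim_stair_sw (h_ : Int) (k : Int) (out : Int) : Prop := out = clim_stair_sw_alt h_ k
instance (h_ : Int) (k : Int) (out : Int) : Decidable (Spec_clim_stair_sw h_ k out) := by unfold Spec_clim_stair_sw; infer_instance

-- ===== CLAIM (what is proved, stated in full; the proofs are below) =====
def Claim_equal_clim_stair_sw : Prop := ∀ (h_ : Int) (k : Int), Dom_clim_stair_sw h_ k → Pre_clim_stair_sw h_ k → Spec_clim_stair_sw h_ k (clim_stair_sw h_ k)

-- ===== LEMMAS AND PROOFS =====

-- the DP sequence as a growing list: wlist K n = [w 0, …, w n], w (n+1) = sum of the last min(n+1,K) entries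
def wlist (K : Nat) : Nat → List Int
  | 0 => [1]
  | n + 1 => wlist K n ++ [((wlist K n).drop (n + 1 - K)).sum]

-- the n-th DP value
def went (K n : Nat) : Int := (wlist K n).getD n 0

theorem length_wlist (K n : Nat) : (wlist K n).length = n + 1 := by
  induction n with
  | zero => rfl
  | succ n ih => simp [wlist, ih]

theorem wlist_succ_def (K n : Nat) :
    wlist K (n + 1) = wlist K n ++ [((wlist K n).drop (n + 1 - K)).sum] := rfl

theorem went_succ (K n : Nat) : went K (n + 1) = ((wlist K n).drop (n + 1 - K)).sum := by
  rw [went, wlist_succ_def, List.getD_append_right _ _ _ _ (by rw [length_wlist])]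
  simp [length_wlist]

theorem getD_wlist (K : Nat) {j n : Nat} (h : j ≤ n) :
    (wlist K n).getD j 0 = went K j := by
  induction n with
  | zero => interval_cases j; rfl
  | succ n ih =>
    rcases Nat.lt_or_ge j (n + 1) with hlt | hge
    · rw [wlist, List.getD_append _ _ _ _ (by rw [length_wlist]; omega)]
      exact ih (by omega)
    · have hj : j = n + 1 := by omega
      subst hj; rfl

-- the key identity: the defining sum equals A's sliding-window update
theorem key_identity (K : Nat) (hK : 1 ≤ K) (j : Nat) :
    ((wlist K (j + 1)).drop (j + 2 - K)).sum =
      if j + 2 ≤ K then went K (j + 1) * 2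
      else went K (j + 1) * 2 - went K (j + 1 - K) := by
  have hwent := went_succ K j
  rw [wlist, List.drop_append_of_le_length (by rw [length_wlist]; omega), List.sum_append,
    List.sum_cons, List.sum_nil]
  by_cases hc : j + 2 ≤ K
  · have h1 : j + 2 - K = 0 := by omega
    have h2 : j + 1 - K = 0 := by omega
    rw [if_pos hc, h1, hwent, h2]
    ring
  · rw [if_neg hc]
    have hm : j + 1 - K < (wlist K j).length := by rw [length_wlist]; omega
    have hd : (wlist K j).drop (j + 1 - K) =
        (wlist K j)[j + 1 - K] :: (wlist K j).drop (j + 1 - K + 1) := List.drop_eq_getElem_cons hm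
    have hidx : j + 2 - K = j + 1 - K + 1 := by omega
    have hg : (wlist K j)[j + 1 - K] = went K (j + 1 - K) := by
      rw [← getD_wlist K (show j + 1 - K ≤ j by omega), List.getD_eq_getElem _ _ hm]
    rw [hidx, hwent, hd]
    simp [hg]
    ring

-- prefix sums of the DP sequence
def psum (K n : Nat) : Int := (wlist K n).sum

-- B's state: the list of prefix sums pre[0..n]
def plist (K : Nat) : Nat → List Int
  | 0 => [1]
  | n + 1 => plist K n ++ [psum K (n + 1)]

theorem plist_succ_def (K n : Nat) : plist K (n + 1) = plist K n ++ [psum K (n + 1)] := rfl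

theorem length_plist (K n : Nat) : (plist K n).length = n + 1 := by
  induction n with
  | zero => rfl
  | succ n ih => simp [plist_succ_def, ih]

theorem getD_plist (K : Nat) {j n : Nat} (h : j ≤ n) :
    (plist K n).getD j 0 = psum K j := by
  induction n with
  | zero => interval_cases j; rfl
  | succ n ih =>
    rcases Nat.lt_or_ge j (n + 1) with hlt | hge
    · rw [plist_succ_def, List.getD_append _ _ _ _ (by rw [length_plist]; omega)]
      exact ih (by omega)
    · have hj : j = n + 1 := by omega
      subst hj
      rw [plist_succ_def, List.getD_append_right _ _ _ _ (by rw [length_plist])]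
      simp [length_plist]

theorem last_plist (K n : Nat) : PySem.List.pyGetD (plist K n) (-1) 0 = psum K n := by
  cases n with
  | zero => rfl
  | succ n => rw [plist_succ_def, PySem.List.pyGetD_neg_one_append_singleton]

theorem psum_succ (K n : Nat) : psum K (n + 1) = psum K n + went K (n + 1) := by
  rw [psum, wlist_succ_def, List.sum_append, ← went_succ]
  simp [psum]

theorem take_wlist (K : Nat) {m n : Nat} (h : m ≤ n) : (wlist K n).take (m + 1) = wlist K m := by
  induction n with
  | zero =>
    have : m = 0 := by omega
    subst this; rfl
  | succ n ih =>
    rcases Nat.lt_or_ge m (n + 1) with hlt | hge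
    · rw [wlist_succ_def, List.take_append_of_le_length (by rw [length_wlist]; omega)]
      exact ih (by omega)
    · have hm : m = n + 1 := by omega
      subst hm
      exact List.take_of_length_le (le_of_eq (length_wlist K (n + 1)))

-- the value of the DP as a difference of prefix sums
theorem went_psum (K : Nat) (hK : 1 ≤ K) (n : Nat) :
    went K (n + 1) = psum K n - (if K ≤ n then psum K (n - K) else 0) := by
  rw [went_succ]
  have hsplit := List.sum_take_add_sum_drop (wlist K n) (n + 1 - K)
  by_cases hc : K ≤ n
  · rw [if_pos hc]
    have ht : (wlist K n).take (n + 1 - K) = wlist K (n - K) := by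
      rw [show n + 1 - K = (n - K) + 1 by omega]
      exact take_wlist K (by omega)
    rw [ht] at hsplit
    have : psum K n = psum K (n - K) + ((wlist K n).drop (n + 1 - K)).sum := by
      rw [psum, psum, ← hsplit]
    omega
  · rw [if_neg hc, show n + 1 - K = 0 by omega, List.drop_zero, psum]
    ring

-- B's fold builds exactly the prefix-sum list
theorem b_fold (k : Int) (hk : 1 ≤ k) (n : Nat) :
    (PySem.List.pyRange 1 ((n : Int) + 1) 1).foldl (fun ps i =>
      let w := PySem.List.pyGetD ps (-1) 0 -
        (if i - k - 1 ≥ 0 then PySem.List.pyGetD ps (i - k - 1) 0 else 0)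
      ps ++ [PySem.List.pyGetD ps (-1) 0 + w]) [(1 : Int)] =
      plist k.toNat n := by
  induction n with
  | zero => rw [PySem.List.pyRange_one_eq_nil (by omega)]; rfl
  | succ n ih =>
    rw [show (((n + 1 : Nat) : Int) + 1) = (((n : Int) + 1) + 1) by push_cast; ring,
      PySem.List.pyRange_one_succ_right (show (1 : Int) ≤ (n : Int) + 1 by omega),
      List.foldl_append, ih]
    simp only [List.foldl_cons, List.foldl_nil]
    rw [plist_succ_def]
    congr 1
    rw [last_plist]
    have hcond : ((n : Int) + 1 - k - 1 ≥ 0) ↔ (k.toNat ≤ n) := by omega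
    by_cases hc : k.toNat ≤ n
    · rw [if_pos (hcond.mpr hc),
        show (n : Int) + 1 - k - 1 = ((n - k.toNat : Nat) : Int) by omega,
        PySem.List.pyGetD_natCast, getD_plist _ (by omega),
        psum_succ, went_psum k.toNat (by omega) n, if_pos hc]
    · rw [if_neg (fun h => hc (hcond.mp h)),
        psum_succ, went_psum k.toNat (by omega) n, if_neg hc]

-- A's fold invariant: after processing 2..i the array is wlist K i followed by untouched 1s
theorem a_fold (k : Int) (hk : 1 ≤ k) (n : Nat) (i : Nat) (h1 : 1 ≤ i) (h2 : i ≤ n) :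
    (PySem.List.pyRange 2 ((i : Int) + 1) 1).foldl (fun recs x =>
        if x ≤ k then
          PySem.List.pySetD recs x (PySem.List.pyGetD recs (x - 1) 0 * 2)
        else
          PySem.List.pySetD recs x
            (PySem.List.pyGetD recs (x - 1) 0 * 2 - PySem.List.pyGetD recs (x - 1 - k) 0))
      (List.replicate (n + 1) (1 : Int)) =
      wlist k.toNat i ++ List.replicate (n - i) (1 : Int) := by
  induction i with
  | zero => omega
  | succ i ih =>
    rcases Nat.lt_or_ge i 1 with hi0 | hi1
    · -- base case i + 1 = 1: nothing processed yet, and wlist K 1 = [1, 1]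
      have : i = 0 := by omega
      subst this
      rw [PySem.List.pyRange_one_eq_nil (by norm_num)]
      have hw1 : wlist k.toNat 1 = [1, 1] := by
        have h0 : 1 - k.toNat = 0 := by omega
        simp [wlist, h0]
      rw [hw1, show n + 1 = 2 + (n - 1) by omega, List.replicate_add]
      rfl
    · -- induction step: process index i + 1 = j + 2
      obtain ⟨j, rfl⟩ : ∃ j, i = j + 1 := ⟨i - 1, by omega⟩
      rw [show (((j + 1 + 1 : Nat) : Int) + 1) = ((((j + 1 : Nat) : Int) + 1) + 1) by push_cast; ring,
        PySem.List.pyRange_one_succ_right (show (2 : Int) ≤ ((j + 1 : Nat) : Int) + 1 by push_cast; omega),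
        List.foldl_append, ih hi1 (by omega)]
      simp only [List.foldl_cons, List.foldl_nil]
      set L := wlist k.toNat (j + 1) ++ List.replicate (n - (j + 1)) (1 : Int) with hL
      have hget1 : PySem.List.pyGetD L (((j + 1 : Nat) : Int) + 1 - 1) 0 = went k.toNat (j + 1) := by
        rw [show ((j + 1 : Nat) : Int) + 1 - 1 = ((j + 1 : Nat) : Int) by ring,
          PySem.List.pyGetD_natCast, hL, List.getD_append _ _ _ _ (by rw [length_wlist]; omega)]
        exact getD_wlist _ (le_refl (j + 1))
      have hki := key_identity k.toNat (by omega) j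
      have hset : PySem.List.pySetD L (((j + 1 : Nat) : Int) + 1)
            (((wlist k.toNat (j + 1)).drop (j + 1 + 1 - k.toNat)).sum) =
          wlist k.toNat (j + 1 + 1) ++ List.replicate (n - (j + 1 + 1)) (1 : Int) := by
        rw [show ((j + 1 : Nat) : Int) + 1 = ((j + 2 : Nat) : Int) by push_cast; ring,
          PySem.List.pySetD_natCast, hL, List.set_append, if_neg (by rw [length_wlist]; omega)]
        obtain ⟨m, hm⟩ : ∃ m, n - (j + 1) = m + 1 := ⟨n - (j + 1) - 1, by omega⟩
        have hm2 : n - (j + 1 + 1) = m := by omega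
        rw [length_wlist, Nat.sub_self, hm, hm2, List.replicate_succ, List.set_cons_zero]
        rw [wlist_succ_def k.toNat (j + 1), List.append_assoc]
        rfl
      split_ifs with hc
      · have hv : PySem.List.pyGetD L (((j + 1 : Nat) : Int) + 1 - 1) 0 * 2 =
            ((wlist k.toNat (j + 1)).drop (j + 1 + 1 - k.toNat)).sum := by
          rw [hget1, show j + 1 + 1 - k.toNat = j + 2 - k.toNat from rfl, hki,
            if_pos (show j + 2 ≤ k.toNat by omega)]
        rw [hv, hset]
      · have hget2 : PySem.List.pyGetD L (((j + 1 : Nat) : Int) + 1 - 1 - k) 0 =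
            went k.toNat (j + 1 - k.toNat) := by
          rw [show ((j + 1 : Nat) : Int) + 1 - 1 - k = ((j + 1 - k.toNat : Nat) : Int) by omega,
            PySem.List.pyGetD_natCast, hL, List.getD_append _ _ _ _ (by rw [length_wlist]; omega)]
          exact getD_wlist _ (by omega)
        have hv : PySem.List.pyGetD L (((j + 1 : Nat) : Int) + 1 - 1) 0 * 2 -
              PySem.List.pyGetD L (((j + 1 : Nat) : Int) + 1 - 1 - k) 0 =
            ((wlist k.toNat (j + 1)).drop (j + 1 + 1 - k.toNat)).sum := by
          rw [hget1, hget2, show j + 1 + 1 - k.toNat = j + 2 - k.toNat from rfl, hki,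
            if_neg (show ¬ j + 2 ≤ k.toNat by omega)]
        rw [hv, hset]

-- ===== VERDICT (by name: the statement is the Claim_ definition above) =====
theorem clim_stair_sw_spec : Claim_equal_clim_stair_sw := by
  intro h_ k _ hpre
  obtain ⟨hh, hk⟩ := hpre
  obtain ⟨N, rfl⟩ : ∃ N : Nat, h_ = (N : Int) := ⟨h_.toNat, by omega⟩
  unfold Spec_clim_stair_sw
  simp only [clim_stair_sw, clim_stair_sw_alt]
  rw [b_fold k hk N, show (((N : Nat) : Int) + 1).toNat = N + 1 by omega]
  have hB : PySem.List.pyGetD (plist k.toNat N) (N : Int) 0 -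
      (if (N : Int) ≥ 1 then PySem.List.pyGetD (plist k.toNat N) ((N : Int) - 1) 0 else 0) =
      went k.toNat N := by
    rcases Nat.lt_or_ge N 1 with hN0 | hN1
    · have : N = 0 := by omega
      subst this
      rw [if_neg (by omega)]
      rfl
    · obtain ⟨m, rfl⟩ : ∃ m, N = m + 1 := ⟨N - 1, by omega⟩
      rw [if_pos (by omega), PySem.List.pyGetD_natCast, getD_plist _ (le_refl (m + 1)),
        show ((m + 1 : Nat) : Int) - 1 = ((m : Nat) : Int) by omega,
        PySem.List.pyGetD_natCast, getD_plist _ (by omega), psum_succ]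
      ring
  rw [hB]
  rcases Nat.lt_or_ge N 1 with hN0 | hN1
  · have : N = 0 := by omega
    subst this
    rw [PySem.List.pyRange_one_eq_nil (by omega)]
    rfl
  · rw [a_fold k hk N N hN1 (le_refl N), Nat.sub_self, List.replicate_zero, List.append_nil,
      PySem.List.pyGetD_natCast]
    exact getD_wlist _ (le_refl N)
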